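-- pv_equiv track=rewrite | github.com/lufftw/neetcode | solutions/1109_corporate_flight_bookings.py | _reference_corp_flight_bookings
-- ===== SOURCE A (Python) =====
-- from typing import List
--
-- def _reference_corp_flight_bookings(bookings: List[List[int]], n: int) -> List[int]:
--     """O(n + m) reference using difference array."""
--     diff = [0] * (n + 1)
--
--     for first, last, seats in bookings:
--         diff[first - 1] += seats
--         if last < n:
--             diff[last] -= seats
--
--     result = []
--     current = 0
--     for i in range(n):
--         current += diff[i]
--         result.append(current)
--
--     return result
-- ===== SOURCE B (Python) =====
-- def _reference_corp_flight_bookings(bookings, n):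
--     result = [0] * (n + 1)
--     for first, last, seats in bookings:
--         result[first-1:] = [x + seats for x in result[first-1:]]
--         if last < n:
--             result[last:] = [x - seats for x in result[last:]]
--     return result[:n]
-- ===== Notes on version B (the rewrite author's own statement) =====
-- stated objective: alternative
-- what changed: B drops the difference array and the final prefix-sum pass: it applies each booking directly as two bulk suffix updates (add seats from first-1 on, subtract them from last on) on the running seat-count array and returns its first n cells.
import Mathlib
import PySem

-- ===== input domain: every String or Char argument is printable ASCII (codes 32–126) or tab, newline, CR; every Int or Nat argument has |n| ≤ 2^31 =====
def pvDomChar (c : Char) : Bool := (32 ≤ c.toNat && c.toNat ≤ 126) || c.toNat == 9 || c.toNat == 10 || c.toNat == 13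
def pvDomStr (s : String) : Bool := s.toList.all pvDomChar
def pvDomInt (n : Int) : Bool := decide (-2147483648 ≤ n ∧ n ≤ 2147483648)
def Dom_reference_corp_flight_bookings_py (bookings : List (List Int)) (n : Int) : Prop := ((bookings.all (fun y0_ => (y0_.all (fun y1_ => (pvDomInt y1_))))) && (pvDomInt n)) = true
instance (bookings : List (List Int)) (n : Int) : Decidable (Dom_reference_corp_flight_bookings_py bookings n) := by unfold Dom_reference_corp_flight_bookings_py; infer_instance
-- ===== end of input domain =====

-- B drops the difference array and the final prefix-sum pass: it applies each booking
-- directly as two bulk suffix updates on the running seat-count array.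

-- ===== PORT A =====
-- loop body of A's first loop ('for first, last, seats in bookings')
def pvStepA (n : Int) (d : List Int) (b : List Int) : List Int :=
  let first := PySem.List.pyGetD b 0 0
  let last := PySem.List.pyGetD b 1 0
  let seats := PySem.List.pyGetD b 2 0
  let d := PySem.List.pySetD d (first - 1) (PySem.List.pyGetD d (first - 1) 0 + seats)
  if last < n then PySem.List.pySetD d last (PySem.List.pyGetD d last 0 - seats) else d

-- loop body of A's second loop ('for i in range(n)', state = (result, current))
def pvPrefixStep (diff : List Int) (acc : List Int × Int) (i : Int) : List Int × Int :=
  let current := acc.2 + PySem.List.pyGetD diff i 0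
  (acc.1 ++ [current], current)

def reference_corp_flight_bookings_py (bookings : List (List Int)) (n : Int) : List Int :=
  let diff := bookings.foldl (pvStepA n) (List.replicate (n + 1).toNat 0)
  ((PySem.List.pyRange 0 n 1).foldl (pvPrefixStep diff) (([] : List Int), (0 : Int))).1

-- ===== PORT B =====
-- loop body of B's loop over bookings: the two suffix slice-assignments
-- ('xs[a:] = ys' is 'xs[:a] ++ ys', both slice bounds with Python's clamping rule)
def pvStepB (n : Int) (result : List Int) (b : List Int) : List Int :=
  let first := PySem.List.pyGetD b 0 0
  let last := PySem.List.pyGetD b 1 0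
  let seats := PySem.List.pyGetD b 2 0
  let result := PySem.List.slice result none (some (first - 1)) ++
    (PySem.List.slice result (some (first - 1)) none).map (fun x => x + seats)
  if last < n then
    PySem.List.slice result none (some last) ++
      (PySem.List.slice result (some last) none).map (fun x => x - seats)
  else result

def reference_corp_flight_bookings_py_alt (bookings : List (List Int)) (n : Int) : List Int :=
  PySem.List.slice (bookings.foldl (pvStepB n) (List.replicate (n + 1).toNat 0)) none (some n)

-- ===== PRECONDITION & SPEC =====
-- Pre_ is exactly the set of inputs on which A returns: every booking has 3 entries (the tuple
-- unpack) and its two used indices are in Python's index range for the (n+1)-cell array;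
-- everywhere else A raises (ValueError / IndexError) and nothing is excluded where A returns.
def Pre_reference_corp_flight_bookings_py (bookings : List (List Int)) (n : Int) : Prop :=
  ∀ b ∈ bookings, b.length = 3 ∧ PySem.Raise.InRange (n + 1).toNat (b.getD 0 0 - 1) ∧
    (b.getD 1 0 < n → PySem.Raise.InRange (n + 1).toNat (b.getD 1 0))
instance (bookings : List (List Int)) (n : Int) : Decidable (Pre_reference_corp_flight_bookings_py bookings n) := by unfold Pre_reference_corp_flight_bookings_py; infer_instance
def pvWitness_reference_corp_flight_bookings_py : List (List Int) × Int := ([[1, 2, 10], [2, 3, 20], [2, 5, 25]], 5)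
def Spec_reference_corp_flight_bookings_py (bookings : List (List Int)) (n : Int) (out : List Int) : Prop := out = reference_corp_flight_bookings_py_alt bookings n
instance (bookings : List (List Int)) (n : Int) (out : List Int) : Decidable (Spec_reference_corp_flight_bookings_py bookings n out) := by unfold Spec_reference_corp_flight_bookings_py; infer_instance

-- ===== CLAIM (what is proved, stated in full; the proofs are below) =====
def Claim_equal_reference_corp_flight_bookings_py : Prop := ∀ (bookings : List (List Int)) (n : Int), Dom_reference_corp_flight_bookings_py bookings n → Pre_reference_corp_flight_bookings_py bookings n → Spec_reference_corp_flight_bookings_py bookings n (reference_corp_flight_bookings_py bookings n)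

-- ===== LEMMAS AND PROOFS =====

-- prefix sum of the first m cells of xs
def pvS (xs : List Int) (m : Nat) : Int := ((List.range m).map (fun j => xs.getD j 0)).sum

theorem pvS_succ (xs : List Int) (m : Nat) : pvS xs (m + 1) = pvS xs m + xs.getD m 0 := by
  simp [pvS, List.range_succ]

theorem pv_getD_set (xs : List Int) (k j : Nat) (v : Int) (hk : k < xs.length) :
    (xs.set k v).getD j 0 = if k = j then v else xs.getD j 0 := by
  by_cases h : k = j
  · subst h; rw [List.getD_eq_getElem?_getD, List.getElem?_set_self hk]; simp
  · rw [List.getD_eq_getElem?_getD, List.getElem?_set_ne h, ← List.getD_eq_getElem?_getD, if_neg h]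

theorem pvS_set (xs : List Int) (k : Nat) (v : Int) (m : Nat) (hk : k < xs.length) :
    pvS (xs.set k v) m = pvS xs m + (if k < m then v - xs.getD k 0 else 0) := by
  induction m with
  | zero => simp [pvS]
  | succ m ih =>
    rw [pvS_succ, pvS_succ, ih, pv_getD_set xs k m v hk]
    by_cases h : k = m
    · subst h
      rw [if_neg (show ¬ k < k by omega), if_pos rfl, if_pos (show k < k + 1 by omega)]; ring
    · rw [if_neg h]
      by_cases h2 : k < m
      · rw [if_pos h2, if_pos (by omega)]; ring
      · rw [if_neg h2, if_neg (by omega)]; ring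

theorem pv_getD0 (b : List Int) : PySem.List.pyGetD b 0 0 = b.getD 0 0 := by
  simpa using PySem.List.pyGetD_of_nonneg b (i := 0) 0 (by omega)

theorem pv_getD1 (b : List Int) : PySem.List.pyGetD b 1 0 = b.getD 1 0 := by
  simpa using PySem.List.pyGetD_of_nonneg b (i := 1) 0 (by omega)

theorem pv_getD2 (b : List Int) : PySem.List.pyGetD b 2 0 = b.getD 2 0 := by
  simpa using PySem.List.pyGetD_of_nonneg b (i := 2) 0 (by omega)

-- Python index/slice normalization under an in-range index
theorem pv_idx_inrange (len : Nat) (i : Int) (h : PySem.Raise.InRange len i) :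
    PySem.List.pyIdx? len i = some (PySem.List.clampIdx len i) := by
  obtain ⟨h1, h2⟩ := h
  simp only [PySem.List.pyIdx?, PySem.List.clampIdx]
  split_ifs <;> first | omega | rfl | (congr 1 <;> omega)

theorem pv_slice_from (xs : List Int) (a : Int) :
    PySem.List.slice xs (some a) none = xs.drop (PySem.List.clampIdx xs.length a) := by
  simp only [PySem.List.slice]
  exact List.take_of_length_le (by simp)

theorem pv_slice_to (xs : List Int) (a : Int) :
    PySem.List.slice xs none (some a) = xs.take (PySem.List.clampIdx xs.length a) := by
  simp [PySem.List.slice]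

theorem pv_clamp_le (len : Nat) (a : Int) : PySem.List.clampIdx len a ≤ len := by
  simp only [PySem.List.clampIdx]; split_ifs <;> omega

theorem pv_set_inrange (xs : List Int) (i : Int) (v : Int) (h : PySem.Raise.InRange xs.length i) :
    PySem.List.pySetD xs i v = xs.set (PySem.List.clampIdx xs.length i) v := by
  simp [PySem.List.pySetD, PySem.List.pySet?, pv_idx_inrange _ _ h]

theorem pv_getD_inrange (xs : List Int) (i : Int) (h : PySem.Raise.InRange xs.length i) :
    PySem.List.pyGetD xs i 0 = xs.getD (PySem.List.clampIdx xs.length i) 0 := by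
  simp [PySem.List.pyGetD, PySem.List.pyGet?, pv_idx_inrange _ _ h, List.getD_eq_getElem?_getD]

theorem pv_clamp_lt (len : Nat) (a : Int) (h : PySem.Raise.InRange len a) :
    PySem.List.clampIdx len a < len := by
  obtain ⟨h1, h2⟩ := h
  simp only [PySem.List.clampIdx]; split_ifs <;> omega

-- a suffix update xs[p:] ← map (· + v), elementwise
theorem pv_suffix_len (xs : List Int) (p : Nat) (f : Int → Int) :
    (xs.take p ++ (xs.drop p).map f).length = xs.length := by
  simp; omega

theorem pv_suffix_getD (xs : List Int) (p : Nat) (v : Int) (j : Nat) (hp : p ≤ xs.length) :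
    (xs.take p ++ (xs.drop p).map (fun x => x + v)).getD j 0 =
      xs.getD j 0 + (if p ≤ j ∧ j < xs.length then v else 0) := by
  rw [List.getD_eq_getElem?_getD, List.getD_eq_getElem?_getD]
  by_cases h1 : j < p
  · rw [List.getElem?_append_left (by simp; omega), List.getElem?_take_of_lt h1, if_neg (by omega)]
    simp
  · rw [List.getElem?_append_right (by simp; omega)]
    by_cases h2 : j < xs.length
    · rw [if_pos (by omega)]
      simp only [List.length_take, List.getElem?_map, List.getElem?_drop]
      have hmin : min p xs.length = p := by omega
      rw [hmin]
      have hjp : p + (j - p) = j := by omega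
      rw [hjp, List.getElem?_eq_getElem h2]
      simp
    · rw [if_neg (by omega)]
      simp only [List.length_take, List.getElem?_map, List.getElem?_drop]
      have hmin : min p xs.length = p := by omega
      rw [hmin, List.getElem?_eq_none (by omega), List.getElem?_eq_none (by omega)]
      simp

-- one booking preserves the coupling "result is the running prefix sums of diff"
theorem pv_step (n : Int) (b diff res : List Int)
    (hb : b.length = 3 ∧ PySem.Raise.InRange (n + 1).toNat (b.getD 0 0 - 1) ∧
      (b.getD 1 0 < n → PySem.Raise.InRange (n + 1).toNat (b.getD 1 0)))
    (hd : diff.length = (n + 1).toNat) (hr : res.length = (n + 1).toNat)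
    (hinv : ∀ i : Nat, i < (n + 1).toNat → res.getD i 0 = pvS diff (i + 1)) :
    (pvStepA n diff b).length = (n + 1).toNat ∧ (pvStepB n res b).length = (n + 1).toNat ∧
      ∀ i : Nat, i < (n + 1).toNat → (pvStepB n res b).getD i 0 = pvS (pvStepA n diff b) (i + 1) := by
  obtain ⟨hb3, hin1, hin2⟩ := hb
  set L := (n + 1).toNat with hLdef
  set f := b.getD 0 0 with hfdef
  set l := b.getD 1 0 with hldef
  set s := b.getD 2 0 with hsdef
  set k1 := PySem.List.clampIdx L (f - 1) with hk1def
  set k2 := PySem.List.clampIdx L l with hk2def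
  -- A's step in set form
  have hA : pvStepA n diff b =
      if l < n then (diff.set k1 (diff.getD k1 0 + s)).set k2 ((diff.set k1 (diff.getD k1 0 + s)).getD k2 0 - s)
      else diff.set k1 (diff.getD k1 0 + s) := by
    simp only [pvStepA, pv_getD0, pv_getD1, pv_getD2, ← hfdef, ← hldef, ← hsdef]
    rw [pv_set_inrange diff _ _ (by rw [hd]; exact hin1),
      pv_getD_inrange diff _ (by rw [hd]; exact hin1), hd]
    by_cases hl : l < n
    · rw [if_pos hl, if_pos hl,
        pv_set_inrange _ _ _ (by rw [List.length_set, hd]; exact hin2 hl),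
        pv_getD_inrange _ _ (by rw [List.length_set, hd]; exact hin2 hl),
        List.length_set, hd]
    · rw [if_neg hl, if_neg hl]
  -- B's step in take/drop form
  have hB : pvStepB n res b =
      let r1 := res.take k1 ++ (res.drop k1).map (fun x => x + s)
      if l < n then r1.take k2 ++ (r1.drop k2).map (fun x => x - s) else r1 := by
    simp only [pvStepB, pv_getD0, pv_getD1, pv_getD2, ← hfdef, ← hldef, ← hsdef,
      pv_slice_from, pv_slice_to, pv_suffix_len, hr]
    rfl
  have hsub : (fun x : Int => x - s) = (fun x : Int => x + (-s)) := funext (fun x => by ring)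
  set r1 := res.take k1 ++ (res.drop k1).map (fun x => x + s) with hr1def
  have hr1len : r1.length = L := by rw [hr1def, pv_suffix_len, hr]
  have hk1le : k1 ≤ L := by rw [hk1def]; exact pv_clamp_le L (f - 1)
  have hk2le : k2 ≤ L := by rw [hk2def]; exact pv_clamp_le L l
  have hk1lt : k1 < L := by
    rw [hk1def, hLdef]; exact pv_clamp_lt _ _ hin1
  have hr1get : ∀ j : Nat, r1.getD j 0 = res.getD j 0 + (if k1 ≤ j ∧ j < L then s else 0) := by
    intro j
    rw [hr1def, pv_suffix_getD res k1 s j (by omega), hr]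
  have hS1 : ∀ i : Nat, i < L →
      pvS (diff.set k1 (diff.getD k1 0 + s)) (i + 1) = pvS diff (i + 1) + (if k1 ≤ i then s else 0) := by
    intro i hi
    rw [pvS_set diff _ _ _ (by omega)]
    by_cases h : k1 < i + 1
    · rw [if_pos h, if_pos (by omega)]; ring
    · rw [if_neg h, if_neg (by omega)]
  by_cases hl : l < n
  · have hk2lt : k2 < L := by rw [hk2def, hLdef]; exact pv_clamp_lt _ _ (hin2 hl)
    have hAlen : (pvStepA n diff b).length = L := by
      rw [hA, if_pos hl]; simp [hd]
    refine ⟨hAlen, ?_, ?_⟩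
    · rw [hB]; simp only [if_pos hl]
      rw [hsub, pv_suffix_len, hr1len]
    · intro i hi
      rw [hB]; simp only [if_pos hl]
      rw [hsub, pv_suffix_getD r1 k2 (-s) i (by omega), hr1len, hr1get i, hinv i hi,
        hA, if_pos hl, pvS_set _ _ _ _ (by simp [hd]; omega), hS1 i hi]
      split_ifs <;> omega
  · refine ⟨by rw [hA, if_neg hl]; simp [hd], by rw [hB]; simp only [if_neg hl]; exact hr1len, ?_⟩
    intro i hi
    rw [hB]; simp only [if_neg hl]
    rw [hr1get i, hinv i hi, hA, if_neg hl, hS1 i hi]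
    split_ifs <;> omega

-- the coupling carried over the whole bookings list
theorem pv_loop (n : Int) : ∀ (bs : List (List Int)) (diff res : List Int),
    (∀ b ∈ bs, b.length = 3 ∧ PySem.Raise.InRange (n + 1).toNat (b.getD 0 0 - 1) ∧
      (b.getD 1 0 < n → PySem.Raise.InRange (n + 1).toNat (b.getD 1 0))) →
    diff.length = (n + 1).toNat → res.length = (n + 1).toNat →
    (∀ i : Nat, i < (n + 1).toNat → res.getD i 0 = pvS diff (i + 1)) →
    (bs.foldl (pvStepA n) diff).length = (n + 1).toNat ∧
      (bs.foldl (pvStepB n) res).length = (n + 1).toNat ∧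
      ∀ i : Nat, i < (n + 1).toNat →
        (bs.foldl (pvStepB n) res).getD i 0 = pvS (bs.foldl (pvStepA n) diff) (i + 1) := by
  intro bs
  induction bs with
  | nil => intro diff res _ hd hr hinv; exact ⟨hd, hr, hinv⟩
  | cons b bs ih =>
    intro diff res hval hd hr hinv
    obtain ⟨h1, h2, h3⟩ := pv_step n b diff res (hval b (by simp)) hd hr hinv
    simpa using ih (pvStepA n diff b) (pvStepB n res b)
      (fun x hx => hval x (by simp [hx])) h1 h2 h3

-- A's final prefix-sum pass computes pvS of each prefix
theorem pv_prefix_pass (diff : List Int) (N : Nat) :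
    ((PySem.List.pyRange 0 (N : Int) 1).foldl (pvPrefixStep diff) (([] : List Int), (0 : Int))) =
      ((List.range N).map (fun i => pvS diff (i + 1)), pvS diff N) := by
  induction N with
  | zero => simp [PySem.List.pyRange_one_eq_nil, pvS]
  | succ N ih =>
    have hcast : ((N + 1 : Nat) : Int) = (N : Int) + 1 := by push_cast; ring
    rw [hcast, PySem.List.pyRange_one_succ_right (by omega), List.foldl_append, ih,
      List.foldl_cons, List.foldl_nil]
    simp [pvPrefixStep, List.range_succ, pvS_succ]

theorem pv_getD_replicate (n j : Nat) : (List.replicate n (0 : Int)).getD j 0 = 0 := by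
  rw [List.getD_eq_getElem?_getD, List.getElem?_replicate]
  by_cases h : j < n <;> simp [h]

theorem pvS_replicate (n m : Nat) : pvS (List.replicate n (0 : Int)) m = 0 := by
  induction m with
  | zero => simp [pvS]
  | succ m ih => rw [pvS_succ, ih, pv_getD_replicate]; ring

-- ===== VERDICT (by name: the statement is the Claim_ definition above) =====
theorem reference_corp_flight_bookings_py_spec : Claim_equal_reference_corp_flight_bookings_py := by
  intro bookings n _ hpre
  unfold Spec_reference_corp_flight_bookings_py
  simp only [reference_corp_flight_bookings_py, reference_corp_flight_bookings_py_alt]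
  obtain ⟨hlenD, hlenR, hrel⟩ := pv_loop n bookings (List.replicate (n + 1).toNat 0)
    (List.replicate (n + 1).toNat 0) hpre (by simp) (by simp)
    (fun i _ => by rw [pv_getD_replicate, pvS_replicate])
  rw [pv_slice_to]
  by_cases hn : 0 ≤ n
  case neg =>
    -- n < 0: the (n+1)-cell array is empty, A's range loop is empty, B's slice of [] is []
    rw [PySem.List.pyRange_one_eq_nil (by omega), List.foldl_nil]
    have hnil : bookings.foldl (pvStepB n) (List.replicate (n + 1).toNat 0) = [] :=
      List.eq_nil_of_length_eq_zero (by rw [hlenR]; omega)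
    rw [hnil]
    simp
  obtain ⟨N, rfl⟩ : ∃ N : Nat, n = (N : Int) := ⟨n.toNat, (Int.toNat_of_nonneg hn).symm⟩
  have hL : ((N : Int) + 1).toNat = N + 1 := by omega
  rw [hL] at hlenR hrel ⊢
  rw [pv_prefix_pass]
  have hclamp : PySem.List.clampIdx (bookings.foldl (pvStepB (N : Int)) (List.replicate (N + 1) 0)).length (N : Int) = N := by
    rw [hlenR]
    simp only [PySem.List.clampIdx]
    split_ifs <;> omega
  rw [hclamp]
  apply List.ext_getElem
  · simp only [List.length_map, List.length_range, List.length_take, hlenR]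
    omega
  · intro i h1 h2
    simp only [List.getElem_map, List.getElem_range, List.getElem_take]
    rw [← hrel i (by simp at h1; omega), List.getD_eq_getElem?_getD,
      List.getElem?_eq_getElem (by rw [hlenR]; simp at h1; omega)]
    simp
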